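-- pv_equiv track=rewrite | github.com/akohl2733/pythonPractice | pythonWeek8/list-string-fundamentals.py | find_common_elements
-- ===== SOURCE A (Python) =====
-- def find_common_elements(s1, s2):
--
--     seen = {}
--
--     for s in s1:
--         seen[s] = 0
--
--     for s in s2:
--         if s in seen:
--             seen[s] = 1
--
--     res = []
--     for k, v in seen.items():
--         if v == 1:
--             res.append(k)
--
--     return res
-- ===== SOURCE B (Python) =====
-- def find_common_elements(s1, s2):
--     s2_set = set(s2)
--     added = set()
--     res = []
--     for x in s1:
--         if x in s2_set and x not in added:
--             added.add(x)
--             res.append(x)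
--     return res
-- ===== Notes on version B (the rewrite author's own statement) =====
-- stated objective: simpler
-- what changed: Replaces A's three passes (build a 0-valued dict over s1, mark members of s2, collect marked keys from the dict) with a single pass over s1 guarded by a prebuilt set of s2 and a dedup set, appending matches directly.
import Mathlib
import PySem

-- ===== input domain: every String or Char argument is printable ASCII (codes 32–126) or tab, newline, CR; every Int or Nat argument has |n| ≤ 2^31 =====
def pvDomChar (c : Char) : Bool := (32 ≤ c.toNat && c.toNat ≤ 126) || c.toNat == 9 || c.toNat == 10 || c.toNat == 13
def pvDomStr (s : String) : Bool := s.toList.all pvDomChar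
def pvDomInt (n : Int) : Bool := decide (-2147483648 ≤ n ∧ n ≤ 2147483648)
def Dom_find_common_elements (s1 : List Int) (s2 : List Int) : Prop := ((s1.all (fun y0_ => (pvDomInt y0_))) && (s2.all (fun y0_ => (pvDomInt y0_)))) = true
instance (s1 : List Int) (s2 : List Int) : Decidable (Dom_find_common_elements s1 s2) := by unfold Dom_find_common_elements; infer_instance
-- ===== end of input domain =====

-- B replaces A's three passes (0-valued dict over s1, mark members of s2, collect marked
-- keys) with a single pass over s1 guarded by a set of s2 and a dedup set (objective: simpler).

-- ===== PORT A =====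
def find_common_elements (s1 : List Int) (s2 : List Int) : List Int :=
  -- seen = {}; for s in s1: seen[s] = 0
  let seen : PySem.Dict Int Int := s1.foldl (fun d s => d.insert s 0) PySem.Dict.empty
  -- for s in s2: if s in seen: seen[s] = 1
  let seen2 : PySem.Dict Int Int :=
    s2.foldl (fun d s => if d.contains s then d.insert s 1 else d) seen
  -- res = []; for k, v in seen.items(): if v == 1: res.append(k)
  seen2.items.foldl (fun res kv => if kv.2 == 1 then res ++ [kv.1] else res) []

-- ===== PORT B =====
def find_common_elements_alt (s1 : List Int) (s2 : List Int) : List Int :=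
  -- s2_set = set(s2)
  let s2set : PySem.Set Int := PySem.Set.ofList s2
  -- added = set(); res = []; for x in s1: if x in s2_set and x not in added: added.add(x); res.append(x)
  (s1.foldl
    (fun (st : PySem.Set Int × List Int) x =>
      if PySem.Set.contains s2set x && !(PySem.Set.contains st.1 x)
      then (PySem.Set.add st.1 x, st.2 ++ [x])
      else st)
    (PySem.Set.empty, [])).2

-- ===== PRECONDITION & SPEC =====
def Spec_find_common_elements (s1 : List Int) (s2 : List Int) (out : List Int) : Prop := out = find_common_elements_alt s1 s2
instance (s1 : List Int) (s2 : List Int) (out : List Int) : Decidable (Spec_find_common_elements s1 s2 out) := by unfold Spec_find_common_elements; infer_instance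

-- ===== CLAIM (what is proved, stated in full; the proofs are below) =====
def Claim_equal_find_common_elements : Prop := ∀ (s1 : List Int) (s2 : List Int), Dom_find_common_elements s1 s2 → Spec_find_common_elements s1 s2 (find_common_elements s1 s2)

-- ===== LEMMAS AND PROOFS =====

-- ---- A side ----

-- loop 1: lookups after 'for s in s1: seen[s] = 0'
theorem loop1_get? (l : List Int) (d : PySem.Dict Int Int) (k : Int) :
    (l.foldl (fun d s => d.insert s 0) d).get? k
      = if k ∈ l then some 0 else d.get? k := by
  induction l generalizing d with
  | nil => simp
  | cons a l ih =>
      simp only [List.foldl_cons, ih, PySem.Dict.get?_insert, List.mem_cons]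
      by_cases hka : k = a <;> by_cases hkl : k ∈ l <;> simp [hka, hkl]

-- loop 2 never changes the key list
theorem loop2_keys (l : List Int) (d : PySem.Dict Int Int) :
    (l.foldl (fun d s => if d.contains s then d.insert s 1 else d) d).keys = d.keys := by
  induction l generalizing d with
  | nil => rfl
  | cons a l ih =>
      simp only [List.foldl_cons]
      by_cases hc : d.contains a
      · rw [if_pos hc, ih, PySem.Dict.keys_insert_of_contains _ _ hc]
      · rw [if_neg hc, ih]

-- loop 2: lookups after 'for s in s2: if s in seen: seen[s] = 1'
theorem loop2_get? (l : List Int) (d : PySem.Dict Int Int) (k : Int) :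
    (l.foldl (fun d s => if d.contains s then d.insert s 1 else d) d).get? k
      = if k ∈ l ∧ d.contains k then some 1 else d.get? k := by
  induction l generalizing d with
  | nil => simp
  | cons a l ih =>
      simp only [List.foldl_cons]
      by_cases hc : d.contains a
      · rw [if_pos hc, ih]
        by_cases hka : k = a
        · subst hka
          simp [hc]
        · simp only [PySem.Dict.contains_insert, PySem.Dict.get?_insert, List.mem_cons,
            hka, false_or]
          by_cases hkl : k ∈ l <;> by_cases hck : d.contains k <;> simp [hkl, hck, hka]
      · rw [if_neg hc, ih]
        by_cases hka : k = a
        · subst hka; simp [hc]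
        · simp [hka]

-- result of A as a filter of the deduplicated s1
theorem A_char (s1 s2 : List Int) :
    find_common_elements s1 s2
      = (PySem.Set.ofList s1).filter (fun k => decide (k ∈ s2)) := by
  unfold find_common_elements
  rw [PySem.List.foldl_append_if]
  have hkeys : (s2.foldl (fun d s => if d.contains s then d.insert s (1 : Int) else d)
      (s1.foldl (fun d s => d.insert s (0 : Int)) PySem.Dict.empty)).keys
        = PySem.Set.ofList s1 := by
    rw [loop2_keys, PySem.Dict.keys_foldl_insert]
    simp [PySem.Set.update_nil_left, PySem.Dict.keys_empty]
  have hnodup : (s2.foldl (fun d s => if d.contains s then d.insert s (1 : Int) else d)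
      (s1.foldl (fun d s => d.insert s (0 : Int)) PySem.Dict.empty)).keys.Nodup := by
    rw [hkeys]; exact PySem.Set.nodup_ofList s1
  rw [PySem.Dict.items_eq_map_keys _ hnodup 0, hkeys]
  rw [List.filter_map, List.map_map]
  simp only [Function.comp_def, List.nil_append]
  rw [List.map_id']
  apply List.filter_congr
  intro k hk
  have hk1 : k ∈ s1 := (PySem.Set.mem_ofList _ _).mp hk
  have hc1 : (s1.foldl (fun d s => d.insert s (0 : Int)) PySem.Dict.empty).contains k = true := by
    rw [PySem.Dict.contains_eq_isSome_get?, loop1_get?]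
    simp [hk1]
  rw [PySem.Dict.getD_eq_get?_getD, loop2_get?]
  by_cases h2 : k ∈ s2
  · simp [h2, hc1]
  · simp [h2, loop1_get?, hk1]

-- ---- B side ----

-- one step of B's loop keeps 'added' and 'res' equal
theorem B_step (p : Int → Bool) (a : PySem.Set Int) (x : Int) :
    (if (p x && !(PySem.Set.contains a x)) = true
     then (PySem.Set.add a x, a ++ [x]) else (a, a))
    = ((if (p x && !(PySem.Set.contains a x)) = true then a ++ [x] else a),
       (if (p x && !(PySem.Set.contains a x)) = true then a ++ [x] else a)) := by
  by_cases hb : (p x && !(PySem.Set.contains a x)) = true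
  · have hm : x ∉ a := fun hmem => by
      simp at hb
      exact hb.2 hmem
    rw [if_pos hb, if_pos hb, PySem.Set.add_of_not_mem hm]
  · rw [if_neg hb, if_neg hb]

-- hence the pair fold is a single list fold
theorem B_pair (p : Int → Bool) (l : List Int) (a : PySem.Set Int) :
    l.foldl
      (fun (st : PySem.Set Int × List Int) x =>
        if p x && !(PySem.Set.contains st.1 x)
        then (PySem.Set.add st.1 x, st.2 ++ [x])
        else st) (a, a)
    = (l.foldl (fun r x => if p x && !(PySem.Set.contains r x) then r ++ [x] else r) a,
       l.foldl (fun r x => if p x && !(PySem.Set.contains r x) then r ++ [x] else r) a) := by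
  induction l generalizing a with
  | nil => rfl
  | cons x l ih =>
      simp only [List.foldl_cons]
      rw [B_step p a x]
      exact ih _

-- the guard is exactly 'if p x then add'
theorem B_step_add (p : Int → Bool) (r : PySem.Set Int) (x : Int) :
    (if p x && !(PySem.Set.contains r x) then r ++ [x] else r)
      = if p x then PySem.Set.add r x else r := by
  by_cases hp : p x
  · by_cases hc : PySem.Set.contains r x = true
    · have hm : x ∈ r := (PySem.Set.contains_iff r x).mp hc
      rw [hc, PySem.Set.add_of_mem hm]
      simp [hp]
    · have hc' : PySem.Set.contains r x = false := Bool.eq_false_iff.mpr hc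
      have hm : x ∉ r := fun hmem => hc ((PySem.Set.contains_iff r x).mpr hmem)
      rw [hc', PySem.Set.add_of_not_mem hm]
      simp [hp]
  · simp [hp]

-- the guarded add-fold is an add-fold over the filtered list
theorem B_filter (p : Int → Bool) (l : List Int) (a : PySem.Set Int) :
    l.foldl (fun r x => if p x then PySem.Set.add r x else r) a
      = (l.filter p).foldl PySem.Set.add a := by
  induction l generalizing a with
  | nil => rfl
  | cons x l ih =>
      by_cases hp : p x <;> simp [hp, ih]

-- set(l) filtered = set(l filtered): add commutes with filter
theorem filter_add (p : Int → Bool) (s : PySem.Set Int) (x : Int) :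
    (PySem.Set.add s x).filter p
      = if p x then PySem.Set.add (s.filter p) x else s.filter p := by
  by_cases hm : x ∈ s
  · rw [PySem.Set.add_of_mem hm]
    by_cases hp : p x
    · have : x ∈ s.filter p := List.mem_filter.mpr ⟨hm, hp⟩
      rw [if_pos hp, PySem.Set.add_of_mem this]
    · rw [if_neg hp]
  · rw [PySem.Set.add_of_not_mem hm, List.filter_append]
    by_cases hp : p x
    · have : x ∉ s.filter p := fun h => hm (List.mem_filter.mp h).1
      rw [if_pos hp, PySem.Set.add_of_not_mem this]
      simp [hp]
    · simp [hp]

theorem update_filter (p : Int → Bool) (l : List Int) (s : PySem.Set Int) :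
    (PySem.Set.update s l).filter p = PySem.Set.update (s.filter p) (l.filter p) := by
  induction l generalizing s with
  | nil => rfl
  | cons x l ih =>
      rw [PySem.Set.update_cons, ih, filter_add, List.filter_cons]
      by_cases hp : p x <;> simp [hp, PySem.Set.update_cons]

theorem ofList_filter (p : Int → Bool) (l : List Int) :
    PySem.Set.ofList (l.filter p) = (PySem.Set.ofList l).filter p := by
  rw [← PySem.Set.update_nil_left (l.filter p), ← PySem.Set.update_nil_left l, update_filter]
  rfl

theorem B_char (s1 s2 : List Int) :
    find_common_elements_alt s1 s2
      = (PySem.Set.ofList s1).filter (fun k => decide (k ∈ s2)) := by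
  show (s1.foldl
      (fun (st : PySem.Set Int × List Int) x =>
        if PySem.Set.contains (PySem.Set.ofList s2) x && !(PySem.Set.contains st.1 x)
        then (PySem.Set.add st.1 x, st.2 ++ [x])
        else st)
      (([] : List Int), ([] : List Int))).2
    = (PySem.Set.ofList s1).filter (fun k => decide (k ∈ s2))
  rw [B_pair]
  rw [show (fun (r : PySem.Set Int) (x : Int) =>
        if PySem.Set.contains (PySem.Set.ofList s2) x && !(PySem.Set.contains r x)
        then r ++ [x] else r)
      = (fun (r : PySem.Set Int) (x : Int) =>
        if PySem.Set.contains (PySem.Set.ofList s2) x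
        then PySem.Set.add r x else r) from funext fun r => funext fun x =>
        B_step_add (fun x => PySem.Set.contains (PySem.Set.ofList s2) x) r x]
  rw [B_filter, ← PySem.Set.ofList_eq_foldl, ← ofList_filter]
  dsimp only
  congr 1
  apply List.filter_congr
  intro x _
  by_cases hx : x ∈ s2
  · simp [hx]
  · have hmem : x ∉ (PySem.Set.ofList s2 : List Int) :=
      fun h => hx ((PySem.Set.mem_ofList _ _).mp h)
    have hc : PySem.Set.contains (PySem.Set.ofList s2) x = false :=
      Bool.eq_false_iff.mpr fun h => hmem ((PySem.Set.contains_iff _ x).mp h)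
    simp [hx]

-- ===== VERDICT (by name: the statement is the Claim_ definition above) =====
theorem find_common_elements_spec : Claim_equal_find_common_elements := by
  intro s1 s2 _
  unfold Spec_find_common_elements
  rw [A_char, B_char]
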